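-- pv_equiv track=rewrite | github.com/CyberSmash/advent-of-code-2021 | day13.py | fold_on_x
-- ===== SOURCE A (Python) =====
-- def fold_on_x(grid, fold_line):
--     line_len = len(grid)
--     row_len = len(grid[0])
--     for x in range(line_len):
--         grid[x][fold_line] = "|"
--
--     num_lines = len(grid)
--
--     left_line = fold_line - 1
--     right_line = fold_line + 1
--     for r in range(0, num_lines):
--         current_left_line = left_line
--         for c in range(right_line, row_len):
--             if grid[r][c] == '#':
--                 grid[r][current_left_line] = '#'
--             current_left_line -= 1
--     for idx in range(num_lines):
--         grid[idx] = grid[idx][:fold_line]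
--     return grid
-- ===== SOURCE B (Python) =====
-- def _folded_row(row, fold_line, width):
--     marks = {2 * fold_line - c for c in range(fold_line + 1, width) if row[c] == '#'}
--     return ['#' if j in marks else row[j] for j in range(fold_line)]
--
--
-- def fold_on_x(grid, fold_line):
--     width = len(grid[0])
--     grid[:] = [_folded_row(row, fold_line, width) for row in grid]
--     return grid
-- ===== Notes on version B (the rewrite author's own statement) =====
-- stated objective: simpler
-- what changed: Replaces A's scatter (three in-place mutation passes: bar write, decrementing-pointer '#' writes from right-half cells, slice-truncate) with a per-row two-stage gather: build a set of mirror-target positions from the '#' cells right of the fold, then one comprehension over the left half reads it.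
-- outside the precondition, e.g. on fold_on_x([['#', '.', '.']], -1): A returns [['#', '#']], B returns [[]]
import Mathlib
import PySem

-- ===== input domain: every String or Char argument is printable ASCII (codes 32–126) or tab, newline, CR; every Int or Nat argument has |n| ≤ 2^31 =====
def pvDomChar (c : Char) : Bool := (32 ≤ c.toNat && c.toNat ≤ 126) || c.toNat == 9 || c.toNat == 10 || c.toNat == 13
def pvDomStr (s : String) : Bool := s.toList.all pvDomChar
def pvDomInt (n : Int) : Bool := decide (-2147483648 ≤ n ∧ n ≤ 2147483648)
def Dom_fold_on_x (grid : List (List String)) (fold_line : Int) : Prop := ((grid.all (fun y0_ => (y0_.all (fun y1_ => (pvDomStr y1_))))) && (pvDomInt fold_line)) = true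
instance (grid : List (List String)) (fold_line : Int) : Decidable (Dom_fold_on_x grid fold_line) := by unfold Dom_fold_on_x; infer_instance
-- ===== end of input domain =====

-- B replaces A's scatter (three in-place mutation passes: bar write, decrementing-pointer writes
-- from right-half cells, slice truncate) by a two-stage gather per row: first a SET of mirror-target
-- positions of the '#' cells in the right half, then a comprehension over the left half; same cost.
-- Both Pythons mutate `grid` in place (A also mutates the row objects); the equivalence proved
-- here is about the RETURN value only.

-- ===== PORT A =====
def fold_on_x (grid : List (List String)) (fold_line : Int) : List (List String) :=
  let line_len : Int := grid.length
  let row_len : Int := (PySem.List.pyGetD grid 0 []).length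
  let g1 := (PySem.List.pyRange 0 line_len 1).foldl
    (fun g x => PySem.List.pySetD g x
      (PySem.List.pySetD (PySem.List.pyGetD g x []) fold_line "|")) grid
  let num_lines : Int := g1.length
  let left_line := fold_line - 1
  let right_line := fold_line + 1
  let g2 := (PySem.List.pyRange 0 num_lines 1).foldl
    (fun g r =>
      ((PySem.List.pyRange right_line row_len 1).foldl
        (fun (s : List (List String) × Int) c =>
          (if PySem.List.pyGetD (PySem.List.pyGetD s.1 r []) c "" = "#"
           then PySem.List.pySetD s.1 r
             (PySem.List.pySetD (PySem.List.pyGetD s.1 r []) s.2 "#")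
           else s.1, s.2 - 1))
        (g, left_line)).1)
    g1
  (PySem.List.pyRange 0 num_lines 1).foldl
    (fun g idx => PySem.List.pySetD g idx
      (PySem.List.slice (PySem.List.pyGetD g idx []) none (some fold_line))) g2

-- ===== PORT B =====
def pvFoldedRow (row : List String) (fold_line : Int) (width : Int) : List String :=
  let marks : PySem.Set Int := PySem.Set.ofList
    (((PySem.List.pyRange (fold_line + 1) width 1).filter
        (fun c => PySem.List.pyGetD row c "" = "#")).map (fun c => 2 * fold_line - c))
  (PySem.List.pyRange 0 fold_line 1).map (fun j =>
    if PySem.Set.contains marks j then "#" else PySem.List.pyGetD row j "")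

def fold_on_x_alt (grid : List (List String)) (fold_line : Int) : List (List String) :=
  let width : Int := (PySem.List.pyGetD grid 0 []).length
  grid.map (fun row => pvFoldedRow row fold_line width)

-- ===== PRECONDITION & SPEC =====
-- Pre_ restricts to the natural domain of the puzzle: a nonempty grid whose rows all reach the
-- declared width (the first row's length) with the fold column strictly inside it
-- (0 ≤ fold_line < width).  It excludes negative fold_line, on which A still happens to return
-- via Python's negative-index wraparound (see the cited example); elsewhere outside Pre_ A raises.
def Pre_fold_on_x (grid : List (List String)) (fold_line : Int) : Prop :=
  grid ≠ [] ∧ 0 ≤ fold_line ∧ fold_line < (grid.headI.length : Int) ∧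
    ∀ row ∈ grid, grid.headI.length ≤ row.length
instance (grid : List (List String)) (fold_line : Int) : Decidable (Pre_fold_on_x grid fold_line) := by
  unfold Pre_fold_on_x; infer_instance

def pvWitness_fold_on_x : List (List String) × Int := ([["#", ".", "#"]], 1)

def Spec_fold_on_x (grid : List (List String)) (fold_line : Int) (out : List (List String)) : Prop :=
  out = fold_on_x_alt grid fold_line
instance (grid : List (List String)) (fold_line : Int) (out : List (List String)) : Decidable (Spec_fold_on_x grid fold_line out) := by
  unfold Spec_fold_on_x; infer_instance

-- ===== CLAIM (what is proved, stated in full; the proofs are below) =====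
def Claim_equal_fold_on_x : Prop := ∀ (grid : List (List String)) (fold_line : Int), Dom_fold_on_x grid fold_line → Pre_fold_on_x grid fold_line → Spec_fold_on_x grid fold_line (fold_on_x grid fold_line)

-- ===== LEMMAS AND PROOFS =====

-- the body of A's inner (mirror) loop, acting on a single row with the moving pointer
def pvRowStep : List String × Int → Int → List String × Int := fun s c =>
  (if PySem.List.pyGetD s.1 c "" = "#"
   then PySem.List.pySetD s.1 s.2 "#" else s.1, s.2 - 1)

-- a Python loop 'for i in range(len(g)): g[i] = f(g[i])' is a map
lemma pvFoldRangeSet {α : Type} (step : List α → Int → List α) (f : α → α)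
    (d : α)
    (hstep : ∀ (g : List α) (k : Nat), k < g.length → step g (k : Int) = g.set k (f (g.getD k d))) :
    ∀ (m k : Nat) (g : List α), k + m = g.length →
      (PySem.List.pyRange (k : Int) (g.length : Int) 1).foldl step g
        = g.take k ++ (g.drop k).map f := by
  intro m
  induction m with
  | zero =>
    intro k g hk
    rw [PySem.List.pyRange_one_eq_nil (by omega)]
    rw [List.drop_eq_nil_of_le (by omega), List.map_nil, List.append_nil,
      List.take_of_length_le (by omega)]
    rfl
  | succ m ih =>
    intro k g hk
    have hkl : k < g.length := by omega
    rw [PySem.List.pyRange_one_cons (by exact_mod_cast hkl)]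
    simp only [List.foldl_cons]
    rw [hstep g k hkl]
    set v := f (g.getD k d) with hv
    have hcast : (k : Int) + 1 = ((k + 1 : Nat) : Int) := by push_cast; ring
    have hlen : (g.set k v).length = g.length := by simp
    have hih := ih (k + 1) (g.set k v) (by simp; omega)
    rw [hlen] at hih
    rw [hcast, hih]
    have hdg : g.drop k = g[k] :: g.drop (k + 1) := List.drop_eq_getElem_cons hkl
    have hgetD : g.getD k d = g[k] := List.getD_eq_getElem g d hkl
    have hts : (g.take (k + 1)).set k v = g.take k ++ [v] := by
      have h1 : g.take (k + 1) = g.take k ++ [g[k]] := by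
        rw [List.take_add_one, List.getElem?_eq_getElem hkl]; rfl
      rw [h1, List.set_append_right _ _ (by simp [Nat.min_eq_left hkl.le])]
      simp [Nat.min_eq_left hkl.le]
    have h2 : (g.set k v).take (k + 1) = g.take k ++ [v] := by
      rw [List.take_set, hts]
    have h3 : (g.set k v).drop (k + 1) = g.drop (k + 1) := by
      rw [List.drop_set, if_pos (by omega)]
    rw [h2, h3, hdg, List.map_cons, List.append_assoc, List.singleton_append, hv, hgetD]

-- A's grid-level inner loop only rewrites row r: it is the row-level loop pvRowStep
lemma pvInnerRowAux (r : Nat) :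
    ∀ (cs : List Int) (g : List (List String)) (cur : Int), r < g.length →
      cs.foldl
        (fun (s : List (List String) × Int) c =>
          (if PySem.List.pyGetD (PySem.List.pyGetD s.1 (r : Int) []) c "" = "#"
           then PySem.List.pySetD s.1 (r : Int)
             (PySem.List.pySetD (PySem.List.pyGetD s.1 (r : Int) []) s.2 "#")
           else s.1, s.2 - 1)) (g, cur)
      = (g.set r (cs.foldl pvRowStep (g.getD r [], cur)).1,
         (cs.foldl pvRowStep (g.getD r [], cur)).2) := by
  intro cs
  induction cs with
  | nil =>
    intro g cur hr
    rw [List.foldl_nil, List.foldl_nil, List.getD_eq_getElem g [] hr,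
      List.set_getElem_self]
  | cons c cs ih =>
    intro g cur hr
    simp only [List.foldl_cons]
    have hget : PySem.List.pyGetD g (r : Int) [] = g.getD r [] := by
      simp [PySem.List.pyGetD_natCast]
    rw [hget]
    by_cases hc : PySem.List.pyGetD (g.getD r []) c "" = "#"
    · rw [if_pos hc]
      have hset : PySem.List.pySetD g (r : Int) (PySem.List.pySetD (g.getD r []) cur "#")
          = g.set r (PySem.List.pySetD (g.getD r []) cur "#") := by
        simp [PySem.List.pySetD_natCast]
      rw [hset]
      set row' := PySem.List.pySetD (g.getD r []) cur "#" with hrow'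
      have hr' : r < (g.set r row').length := by simpa using hr
      rw [ih (g.set r row') (cur - 1) hr']
      have hgd : (g.set r row').getD r [] = row' := by
        rw [List.getD_eq_getElem _ _ hr']
        simp
      rw [hgd, List.set_set]
      have hstep : pvRowStep (g.getD r [], cur) c = (row', cur - 1) := by
        simp only [pvRowStep]
        rw [if_pos hc]
      rw [hstep]
    · rw [if_neg hc]
      rw [ih g (cur - 1) hr]
      have hstep : pvRowStep (g.getD r [], cur) c = (g.getD r [], cur - 1) := by
        simp only [pvRowStep]
        rw [if_neg hc]
      rw [hstep]

-- characterisation of A as a per-row map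
lemma pvFoldOnXEq (grid : List (List String)) (fl : Int) :
    fold_on_x grid fl = grid.map (fun row =>
      PySem.List.slice
        (((PySem.List.pyRange (fl + 1) ((PySem.List.pyGetD grid 0 []).length : Int) 1).foldl
            pvRowStep (PySem.List.pySetD row fl "|", fl - 1)).1)
        none (some fl)) := by
  simp only [fold_on_x]
  set rl : Int := ((PySem.List.pyGetD grid 0 []).length : Int) with hrl
  set f1 : List String → List String := fun row => PySem.List.pySetD row fl "|" with hf1
  set f2 : List String → List String := fun row =>
    ((PySem.List.pyRange (fl + 1) rl 1).foldl pvRowStep (row, fl - 1)).1 with hf2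
  set f3 : List String → List String := fun row =>
    PySem.List.slice row none (some fl) with hf3
  have h1 := pvFoldRangeSet
    (fun g x => PySem.List.pySetD g x (PySem.List.pySetD (PySem.List.pyGetD g x []) fl "|"))
    f1 []
    (fun g k hk => by simp [hf1])
    grid.length 0 grid (by omega)
  simp only [Nat.cast_zero, List.take_zero, List.drop_zero, List.nil_append] at h1
  rw [h1]
  have h2 := pvFoldRangeSet
    (fun g r =>
      ((PySem.List.pyRange (fl + 1) rl 1).foldl
        (fun (s : List (List String) × Int) c =>
          (if PySem.List.pyGetD (PySem.List.pyGetD s.1 r []) c "" = "#"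
           then PySem.List.pySetD s.1 r
             (PySem.List.pySetD (PySem.List.pyGetD s.1 r []) s.2 "#")
           else s.1, s.2 - 1))
        (g, fl - 1)).1)
    f2 []
    (fun g k hk => by
      have := pvInnerRowAux k (PySem.List.pyRange (fl + 1) rl 1) g (fl - 1) hk
      simp only [this, hf2])
    (grid.map f1).length 0 (grid.map f1) (by omega)
  simp only [Nat.cast_zero, List.take_zero, List.drop_zero, List.nil_append] at h2
  rw [h2]
  have hlen2 : ((grid.map f1).map f2).length = (grid.map f1).length := by simp
  rw [hlen2.symm]
  have h3 := pvFoldRangeSet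
    (fun g idx => PySem.List.pySetD g idx
      (PySem.List.slice (PySem.List.pyGetD g idx []) none (some fl)))
    f3 []
    (fun g k hk => by simp [hf3])
    ((grid.map f1).map f2).length 0 ((grid.map f1).map f2) (by omega)
  simp only [Nat.cast_zero, List.take_zero, List.drop_zero, List.nil_append] at h3
  rw [h3]
  simp only [List.map_map]
  rfl

-- pySetD at a negative in-range index wraps to length + i
lemma pvSetDNeg (xs : List String) (i : Int) (v : String)
    (h1 : -(xs.length : Int) ≤ i) (h2 : i < 0) :
    PySem.List.pySetD xs i v = xs.set (xs.length - (-i).toNat) v := by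
  simp only [PySem.List.pySetD, PySem.List.pySet?, PySem.List.pyIdx?]
  rw [if_neg (by omega), if_pos h1]
  rfl

-- A's mirror loop never changes the row length
lemma pvLoopLen : ∀ (cs : List Int) (rowA : List String) (cur : Int),
    ((cs.foldl pvRowStep (rowA, cur)).1).length = rowA.length := by
  intro cs
  induction cs with
  | nil => intro rowA cur; rfl
  | cons c cs ih =>
    intro rowA cur
    simp only [List.foldl_cons, pvRowStep]
    split_ifs with h
    · rw [ih]; exact PySem.List.length_pySetD rowA cur "#"
    · exact ih rowA (cur - 1)

-- gather characterisation of A's scatter loop: after processing columns c..n-1, cell j (< flN)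
-- holds '#' exactly when its not-yet-processed mirror column 2*flN-j carries '#' in the original row
lemma pvGather (flN n : Nat) (row0 : List String) (hn : n ≤ row0.length) (j : Nat) (hj : j < flN) :
    ∀ (m c : Nat) (rowA : List String), c + m = n → flN + 1 ≤ c →
      rowA.length = row0.length →
      (∀ i : Nat, c ≤ i → i ≤ 2 * flN → rowA.getD i "" = row0.getD i "") →
      (((PySem.List.pyRange (c : Int) (n : Int) 1).foldl pvRowStep
          (rowA, 2 * (flN : Int) - (c : Int))).1).getD j ""
        = if c ≤ 2 * flN - j ∧ 2 * flN - j < n ∧ row0.getD (2 * flN - j) "" = "#"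
          then "#" else rowA.getD j "" := by
  intro m
  induction m with
  | zero =>
    intro c rowA hc hcfl hlenA hinv
    rw [PySem.List.pyRange_one_eq_nil (by omega), List.foldl_nil,
      if_neg (fun h => by obtain ⟨h1, h2, _⟩ := h; omega)]
  | succ m ih =>
    intro c rowA hc hcfl hlenA hinv
    have hcn : c < n := by omega
    rw [PySem.List.pyRange_one_cons (by exact_mod_cast hcn), List.foldl_cons]
    simp only [pvRowStep, PySem.List.pyGetD_natCast]
    have hcastc : (c : Int) + 1 = ((c + 1 : Nat) : Int) := by push_cast; ring
    have hcastp : 2 * (flN : Int) - (c : Int) - 1 = 2 * (flN : Int) - ((c + 1 : Nat) : Int) := by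
      push_cast; ring
    by_cases hmid : c ≤ 2 * flN
    · rw [hinv c le_rfl hmid]
      by_cases hs : row0.getD c "" = "#"
      · rw [if_pos hs]
        have hsetA : PySem.List.pySetD rowA (2 * (flN : Int) - (c : Int)) "#"
            = rowA.set (2 * flN - c) "#" := by
          rw [PySem.List.pySetD_of_nonneg rowA "#" (by omega)]
          congr 1
          omega
        rw [hsetA, hcastp, hcastc]
        rw [ih (c + 1) (rowA.set (2 * flN - c) "#") (by omega) (by omega)
          (by simpa using hlenA)
          (fun i hi1 hi2 => by
            rw [List.getD_eq_getElem?_getD, List.getElem?_set_ne (by omega),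
              ← List.getD_eq_getElem?_getD]
            exact hinv i (by omega) hi2)]
        by_cases hcj : c = 2 * flN - j
        · rw [if_neg (fun h => by obtain ⟨h1, _, _⟩ := h; omega),
            if_pos ⟨by omega, by omega, by rw [← hcj]; exact hs⟩]
          rw [List.getD_eq_getElem?_getD,
            show 2 * flN - c = j from by omega,
            List.getElem?_set_self (by omega)]
          rfl
        · have hne : (rowA.set (2 * flN - c) "#").getD j "" = rowA.getD j "" := by
            rw [List.getD_eq_getElem?_getD, List.getElem?_set_ne (by omega),
              ← List.getD_eq_getElem?_getD]
          by_cases hcond : c + 1 ≤ 2 * flN - j ∧ 2 * flN - j < n ∧ row0.getD (2 * flN - j) "" = "#"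
          · rw [if_pos hcond, if_pos ⟨by omega, hcond.2⟩]
          · rw [if_neg hcond, if_neg (fun h => hcond ⟨by omega, h.2⟩), hne]
      · rw [if_neg hs, hcastp, hcastc]
        rw [ih (c + 1) rowA (by omega) (by omega) hlenA
          (fun i hi1 hi2 => hinv i (by omega) hi2)]
        by_cases hcond : c + 1 ≤ 2 * flN - j ∧ 2 * flN - j < n ∧ row0.getD (2 * flN - j) "" = "#"
        · rw [if_pos hcond, if_pos ⟨by omega, hcond.2⟩]
        · rw [if_neg hcond, if_neg]
          intro h
          obtain ⟨h1, h2, h3⟩ := h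
          rcases Nat.eq_or_lt_of_le h1 with he | hl
          · rw [← he] at h3
            exact hs h3
          · exact hcond ⟨by omega, h2, h3⟩
    · -- c > 2*flN: A may write at a wrapped (negative) index ≥ 2*flN+1; cell j is untouched
      by_cases hs : rowA.getD c "" = "#"
      · rw [if_pos hs]
        have hw : PySem.List.pySetD rowA (2 * (flN : Int) - (c : Int)) "#"
            = rowA.set (rowA.length - (c - 2 * flN)) "#" := by
          rw [pvSetDNeg rowA _ "#" (by omega) (by omega)]
          congr 1
          omega
        rw [hw, hcastp, hcastc]
        have hidx : 2 * flN + 1 ≤ rowA.length - (c - 2 * flN) := by omega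
        rw [ih (c + 1) (rowA.set (rowA.length - (c - 2 * flN)) "#") (by omega) (by omega)
          (by simpa using hlenA)
          (fun i hi1 hi2 => False.elim (by omega))]
        have hne : (rowA.set (rowA.length - (c - 2 * flN)) "#").getD j "" = rowA.getD j "" := by
          rw [List.getD_eq_getElem?_getD, List.getElem?_set_ne (by omega),
            ← List.getD_eq_getElem?_getD]
        rw [if_neg (fun h => by obtain ⟨h1, _, _⟩ := h; omega),
          if_neg (fun h => by obtain ⟨h1, _, _⟩ := h; omega), hne]
      · rw [if_neg hs, hcastp, hcastc]
        rw [ih (c + 1) rowA (by omega) (by omega) hlenA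
          (fun i hi1 hi2 => False.elim (by omega))]
        rw [if_neg (fun h => by obtain ⟨h1, _, _⟩ := h; omega),
          if_neg (fun h => by obtain ⟨h1, _, _⟩ := h; omega)]

-- per-row equality: A's scatter pipeline on one row equals B's gather comprehension
lemma pvRowMain (flN n : Nat) (row0 : List String) (hn : n ≤ row0.length) (hfl : flN < n) :
    PySem.List.slice
      (((PySem.List.pyRange ((flN : Int) + 1) ((n : Nat) : Int) 1).foldl pvRowStep
          (PySem.List.pySetD row0 (flN : Int) "|", (flN : Int) - 1)).1)
      none (some (flN : Int))
      = (PySem.List.pyRange 0 (flN : Int) 1).map (fun j =>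
          if 2 * (flN : Int) - j < ((n : Nat) : Int) ∧
              PySem.List.pyGetD row0 (2 * (flN : Int) - j) "" = "#"
          then "#" else PySem.List.pyGetD row0 j "") := by
  rw [PySem.List.slice_to_natCast]
  have hset0 : PySem.List.pySetD row0 (flN : Int) "|" = row0.set flN "|" := by simp
  have hcur : (flN : Int) - 1 = 2 * (flN : Int) - ((flN + 1 : Nat) : Int) := by push_cast; ring
  have hstart : (flN : Int) + 1 = ((flN + 1 : Nat) : Int) := by push_cast; ring
  rw [hset0, hcur, hstart]
  set L := ((PySem.List.pyRange ((flN + 1 : Nat) : Int) ((n : Nat) : Int) 1).foldl pvRowStep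
    (row0.set flN "|", 2 * (flN : Int) - ((flN + 1 : Nat) : Int))).1 with hL
  have hLlen : L.length = row0.length := by
    rw [hL, pvLoopLen]
    simp
  apply List.ext_getElem
  · simp [hLlen, PySem.List.length_pyRange_one]
    omega
  · intro k h1 h2
    have hk : k < flN := by
      rw [List.length_take, hLlen] at h1
      omega
    have hkL : k < L.length := by omega
    rw [List.getElem_take, List.getElem_map, PySem.List.getElem_pyRange_one]
    have hget : L[k] = L.getD k "" := (List.getD_eq_getElem L "" hkL).symm
    rw [hget, hL]
    rw [pvGather flN n row0 hn k hk (n - (flN + 1)) (flN + 1) (row0.set flN "|")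
      (by omega) le_rfl (by simp)
      (fun i hi1 hi2 => by
        rw [List.getD_eq_getElem?_getD, List.getElem?_set_ne (by omega),
          ← List.getD_eq_getElem?_getD])]
    have hcastM : ((2 * flN - k : Nat) : Int) = 2 * (flN : Int) - (0 + (k : Int)) := by omega
    have hcastk : (0 : Int) + (k : Int) = ((k : Nat) : Int) := by omega
    rw [← hcastM, hcastk, PySem.List.pyGetD_natCast, PySem.List.pyGetD_natCast]
    have hiff : (flN + 1 ≤ 2 * flN - k ∧ 2 * flN - k < n ∧ row0.getD (2 * flN - k) "" = "#")
        ↔ (((2 * flN - k : Nat) : Int) < ((n : Nat) : Int) ∧ row0.getD (2 * flN - k) "" = "#") := by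
      constructor
      · intro h
        exact ⟨by exact_mod_cast h.2.1, h.2.2⟩
      · intro h
        exact ⟨by omega, by exact_mod_cast h.1, h.2⟩
    rw [if_congr hiff rfl rfl]
    have helse : (row0.set flN "|").getD k "" = row0.getD k "" := by
      rw [List.getD_eq_getElem?_getD, List.getElem?_set_ne (by omega),
        ← List.getD_eq_getElem?_getD]
    rw [helse]

-- B's marks set holds exactly the left positions whose mirror column carries '#'
lemma pvFoldedRowEq (flN n : Nat) (row0 : List String) :
    pvFoldedRow row0 (flN : Int) ((n : Nat) : Int)
      = (PySem.List.pyRange 0 (flN : Int) 1).map (fun j =>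
          if 2 * (flN : Int) - j < ((n : Nat) : Int) ∧
              PySem.List.pyGetD row0 (2 * (flN : Int) - j) "" = "#"
          then "#" else PySem.List.pyGetD row0 j "") := by
  simp only [pvFoldedRow]
  apply List.map_congr_left
  intro j hj
  rw [PySem.List.mem_pyRange_one] at hj
  have hmem : PySem.Set.contains (PySem.Set.ofList
      (((PySem.List.pyRange ((flN : Int) + 1) ((n : Nat) : Int) 1).filter
          (fun c => PySem.List.pyGetD row0 c "" = "#")).map (fun c => 2 * (flN : Int) - c))) j = true
      ↔ (2 * (flN : Int) - j < ((n : Nat) : Int) ∧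
          PySem.List.pyGetD row0 (2 * (flN : Int) - j) "" = "#") := by
    rw [PySem.Set.contains_iff, PySem.Set.mem_ofList, List.mem_map]
    constructor
    · rintro ⟨c, hc, hcj⟩
      rw [List.mem_filter] at hc
      obtain ⟨hcr, hcs⟩ := hc
      rw [PySem.List.mem_pyRange_one] at hcr
      have hce : c = 2 * (flN : Int) - j := by omega
      rw [hce] at hcs hcr
      exact ⟨by omega, by simpa using hcs⟩
    · rintro ⟨h1, h2⟩
      refine ⟨2 * (flN : Int) - j, ?_, by ring⟩
      rw [List.mem_filter, PySem.List.mem_pyRange_one]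
      exact ⟨⟨by omega, h1⟩, by simpa using h2⟩
  by_cases hc : PySem.Set.contains (PySem.Set.ofList
      (((PySem.List.pyRange ((flN : Int) + 1) ((n : Nat) : Int) 1).filter
          (fun c => PySem.List.pyGetD row0 c "" = "#")).map (fun c => 2 * (flN : Int) - c))) j = true
  · rw [if_pos hc, if_pos (hmem.mp hc)]
  · rw [if_neg hc, if_neg (fun h => hc (hmem.mpr h))]

-- ===== VERDICT (by name: the statement is the Claim_ definition above) =====
theorem fold_on_x_spec : Claim_equal_fold_on_x := by
  intro grid fl _ hpre
  obtain ⟨hne, hfl0, hfllt, hrect⟩ := hpre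
  unfold Spec_fold_on_x
  obtain ⟨flN, rfl⟩ : ∃ k : Nat, fl = (k : Int) := ⟨fl.toNat, (Int.toNat_of_nonneg hfl0).symm⟩
  have hhead : PySem.List.pyGetD grid 0 [] = grid.headI := by
    cases grid with
    | nil => exact absurd rfl hne
    | cons a t => simp [PySem.List.pyGetD_zero]
  rw [pvFoldOnXEq]
  simp only [fold_on_x_alt]
  rw [hhead]
  apply List.map_congr_left
  intro row hrow
  have hlen : grid.headI.length ≤ row.length := hrect row hrow
  have hfln : flN < grid.headI.length := by exact_mod_cast hfllt
  rw [pvFoldedRowEq flN grid.headI.length row]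
  exact pvRowMain flN grid.headI.length row hlen hfln
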